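-- pv_equiv track=rewrite | github.com/shreenapatel/advent-of-code-2022 | aoc/solutions/day02.py | part1
-- ===== SOURCE A (Python) =====
-- def part1(data):
--
--     rounds = [tuple(x.split(" ")) for x in data.rstrip("\n").split("\n")]
--
--     win_combos = [("A", "Y"), ("B", "Z"), ("C", "X")]
--     draw_combos = [("A", "X"), ("B", "Y"), ("C", "Z")]
--
--     draws = [r for r in rounds if r in draw_combos]
--     wins = [r for r in rounds if r in win_combos]
--
--     moves = [r[1] for r in rounds]
--
--     score = (
--         moves.count("X")
--         + 2 * moves.count("Y")
--         + 3 * moves.count("Z")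
--         + 3 * len(draws)
--         + 6 * len(wins)
--     )
--
--     return score
-- ===== SOURCE B (Python) =====
-- def part1(data):
--     move_pts = {"X": 1, "Y": 2, "Z": 3}
--     draw_set = {("A", "X"), ("B", "Y"), ("C", "Z")}
--     win_set = {("A", "Y"), ("B", "Z"), ("C", "X")}
--     total = 0
--     for line in data.rstrip("\n").split("\n"):
--         r = tuple(line.split(" "))
--         total += move_pts.get(r[1], 0)
--         if r in draw_set:
--             total += 3
--         elif r in win_set:
--             total += 6
--     return total
-- ===== Notes on version B (the rewrite author's own statement) =====
-- stated objective: simpler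
-- what changed: Replaces A's three .count passes over the moves list plus two filter comprehensions (with list membership) by a single accumulating loop over the rounds, using a move-points dict keyed on r[1] and draw/win sets.
import Mathlib
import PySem

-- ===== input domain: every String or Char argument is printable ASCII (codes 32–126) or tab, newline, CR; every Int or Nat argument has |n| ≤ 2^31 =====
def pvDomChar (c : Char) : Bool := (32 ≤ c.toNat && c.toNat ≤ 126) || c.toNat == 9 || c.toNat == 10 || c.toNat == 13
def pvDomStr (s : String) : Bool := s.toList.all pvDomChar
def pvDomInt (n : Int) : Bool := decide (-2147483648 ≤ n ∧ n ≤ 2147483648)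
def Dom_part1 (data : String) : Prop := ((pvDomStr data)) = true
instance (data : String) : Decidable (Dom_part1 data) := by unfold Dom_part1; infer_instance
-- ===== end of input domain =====

-- B replaces A's three .count passes and two filter comprehensions by a single accumulating
-- loop over the rounds (move-points dict keyed on r[1] plus draw/win set tests); objective: simpler.

-- hand port of s.rstrip("\n") (PySem has no rstrip-with-chars): drop the trailing '\n' characters; exact
def pvRstripNl (cs : List Char) : List Char := (cs.reverse.dropWhile (· == '\n')).reverse

-- ===== PORT A =====
def part1 (data : String) : Int :=
  let rounds : List (List (List Char)) :=
    (PySem.Chars.splitOn (pvRstripNl data.toList) ['\n']).map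
      (fun x => PySem.Chars.splitOn x [' '])
  let win_combos : List (List (List Char)) := [[['A'], ['Y']], [['B'], ['Z']], [['C'], ['X']]]
  let draw_combos : List (List (List Char)) := [[['A'], ['X']], [['B'], ['Y']], [['C'], ['Z']]]
  let draws := rounds.filter (fun r => decide (r ∈ draw_combos))
  let wins := rounds.filter (fun r => decide (r ∈ win_combos))
  let moves := rounds.map (fun r => PySem.List.pyGetD r 1 [])
  (PySem.List.count moves ['X'] : Int)
    + 2 * (PySem.List.count moves ['Y'] : Int)
    + 3 * (PySem.List.count moves ['Z'] : Int)
    + 3 * (draws.length : Int)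
    + 6 * (wins.length : Int)

-- ===== PORT B =====
def part1_alt (data : String) : Int :=
  let move_pts : PySem.Dict (List Char) Int :=
    PySem.Dict.ofList [(['X'], 1), (['Y'], 2), (['Z'], 3)]
  let draw_set : PySem.Set (List (List Char)) :=
    PySem.Set.ofList [[['A'], ['X']], [['B'], ['Y']], [['C'], ['Z']]]
  let win_set : PySem.Set (List (List Char)) :=
    PySem.Set.ofList [[['A'], ['Y']], [['B'], ['Z']], [['C'], ['X']]]
  (PySem.Chars.splitOn (pvRstripNl data.toList) ['\n']).foldl
    (fun total line =>
      let r := PySem.Chars.splitOn line [' ']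
      let total := total + move_pts.getD (PySem.List.pyGetD r 1 []) 0
      if PySem.Set.contains draw_set r then total + 3
      else if PySem.Set.contains win_set r then total + 6
      else total)
    0

-- ===== PRECONDITION & SPEC =====
-- Pre_ excludes exactly the inputs where some line has no space: there r[1] raises IndexError in
-- both A and B.
def Pre_part1 (data : String) : Prop :=
  ∀ l ∈ PySem.Chars.splitOn (pvRstripNl data.toList) ['\n'],
    2 ≤ (PySem.Chars.splitOn l [' ']).length
instance (data : String) : Decidable (Pre_part1 data) := by unfold Pre_part1; infer_instance
def pvWitness_part1 : String := "A Y\nB X\nC Z\n"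

def Spec_part1 (data : String) (out : Int) : Prop := out = part1_alt data
instance (data : String) (out : Int) : Decidable (Spec_part1 data out) := by unfold Spec_part1; infer_instance

-- ===== CLAIM (what is proved, stated in full; the proofs are below) =====
def Claim_equal_part1 : Prop := ∀ (data : String), Dom_part1 data → Pre_part1 data → Spec_part1 data (part1 data)

-- ===== LEMMAS AND PROOFS =====

-- A's per-round score contribution
def pvContrib (r : List (List Char)) : Int :=
  (if PySem.List.pyGetD r 1 [] = ['X'] then 1 else 0)
  + 2 * (if PySem.List.pyGetD r 1 [] = ['Y'] then 1 else 0)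
  + 3 * (if PySem.List.pyGetD r 1 [] = ['Z'] then 1 else 0)
  + (if r ∈ [[['A'], ['X']], [['B'], ['Y']], [['C'], ['Z']]] then 3 else 0)
  + (if r ∈ [[['A'], ['Y']], [['B'], ['Z']], [['C'], ['X']]] then 6 else 0)

-- A's total as a function of the parsed rounds
def pvScoreA (rounds : List (List (List Char))) : Int :=
  (PySem.List.count (rounds.map (fun r => PySem.List.pyGetD r 1 [])) ['X'] : Int)
    + 2 * (PySem.List.count (rounds.map (fun r => PySem.List.pyGetD r 1 [])) ['Y'] : Int)
    + 3 * (PySem.List.count (rounds.map (fun r => PySem.List.pyGetD r 1 [])) ['Z'] : Int)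
    + 3 * ((rounds.filter (fun r => decide (r ∈ [[['A'], ['X']], [['B'], ['Y']], [['C'], ['Z']]]))).length : Int)
    + 6 * ((rounds.filter (fun r => decide (r ∈ [[['A'], ['Y']], [['B'], ['Z']], [['C'], ['X']]]))).length : Int)

lemma pvScoreA_nil : pvScoreA [] = 0 := by decide

lemma pvScoreA_cons (r : List (List Char)) (rs : List (List (List Char))) :
    pvScoreA (r :: rs) = pvContrib r + pvScoreA rs := by
  simp only [pvScoreA, pvContrib, List.map_cons, PySem.List.count, List.count_cons,
    List.filter_cons]
  by_cases h1 : PySem.List.pyGetD r 1 [] = ['X'] <;>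
  by_cases h2 : PySem.List.pyGetD r 1 [] = ['Y'] <;>
  by_cases h3 : PySem.List.pyGetD r 1 [] = ['Z'] <;>
  by_cases h4 : r ∈ [[['A'], ['X']], [['B'], ['Y']], [['C'], ['Z']]] <;>
  by_cases h5 : r ∈ [[['A'], ['Y']], [['B'], ['Z']], [['C'], ['X']]] <;>
  simp_all <;> ring

-- B's loop body adds exactly A's per-round contribution
lemma pvStep (acc : Int) (r : List (List Char)) :
    (if PySem.Set.contains (PySem.Set.ofList [[['A'], ['X']], [['B'], ['Y']], [['C'], ['Z']]]) r then
        (acc + (PySem.Dict.ofList [(['X'], (1:Int)), (['Y'], 2), (['Z'], 3)]).getD (PySem.List.pyGetD r 1 []) 0) + 3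
      else if PySem.Set.contains (PySem.Set.ofList [[['A'], ['Y']], [['B'], ['Z']], [['C'], ['X']]]) r then
        (acc + (PySem.Dict.ofList [(['X'], (1:Int)), (['Y'], 2), (['Z'], 3)]).getD (PySem.List.pyGetD r 1 []) 0) + 6
      else acc + (PySem.Dict.ofList [(['X'], (1:Int)), (['Y'], 2), (['Z'], 3)]).getD (PySem.List.pyGetD r 1 []) 0)
    = acc + pvContrib r := by
  have hd : (PySem.Dict.ofList [(['X'], (1:Int)), (['Y'], 2), (['Z'], 3)]).getD (PySem.List.pyGetD r 1 []) 0
      = (if PySem.List.pyGetD r 1 [] = ['X'] then 1 else 0)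
        + 2 * (if PySem.List.pyGetD r 1 [] = ['Y'] then 1 else 0)
        + 3 * (if PySem.List.pyGetD r 1 [] = ['Z'] then 1 else 0) := by
    generalize PySem.List.pyGetD r 1 [] = m
    have hit : (PySem.Dict.ofList [(['X'], (1:Int)), (['Y'], 2), (['Z'], 3)]).items
        = [(['X'], 1), (['Y'], 2), (['Z'], 3)] := by rfl
    by_cases h1 : m = ['X']
    · subst h1; decide
    by_cases h2 : m = ['Y']
    · subst h2; decide
    by_cases h3 : m = ['Z']
    · subst h3; decide
    have e1 : (['X'] == m) = false := beq_eq_false_iff_ne.mpr (Ne.symm h1)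
    have e2 : (['Y'] == m) = false := beq_eq_false_iff_ne.mpr (Ne.symm h2)
    have e3 : (['Z'] == m) = false := beq_eq_false_iff_ne.mpr (Ne.symm h3)
    simp [PySem.Dict.getD, PySem.Dict.get?, hit, List.find?, e1, e2, e3, h1, h2, h3]
  rw [hd]
  simp only [pvContrib, PySem.Set.contains_eq_listContains]
  by_cases h4 : r ∈ [[['A'], ['X']], [['B'], ['Y']], [['C'], ['Z']]] <;>
  by_cases h5 : r ∈ [[['A'], ['Y']], [['B'], ['Z']], [['C'], ['X']]]
  · exfalso
    simp only [List.mem_cons, List.not_mem_nil, or_false] at h4 h5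
    rcases h4 with h4 | h4 | h4 <;> subst h4 <;> simp_all
  all_goals
    simp_all [PySem.Set.ofList, List.contains_eq_mem] <;> ring

lemma pvFold (lines : List (List Char)) (acc : Int) :
    lines.foldl (fun total line =>
      if PySem.Set.contains (PySem.Set.ofList [[['A'], ['X']], [['B'], ['Y']], [['C'], ['Z']]]) (PySem.Chars.splitOn line [' ']) then
        total + (PySem.Dict.ofList [(['X'], (1:Int)), (['Y'], 2), (['Z'], 3)]).getD (PySem.List.pyGetD (PySem.Chars.splitOn line [' ']) 1 []) 0 + 3
      else if PySem.Set.contains (PySem.Set.ofList [[['A'], ['Y']], [['B'], ['Z']], [['C'], ['X']]]) (PySem.Chars.splitOn line [' ']) then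
        total + (PySem.Dict.ofList [(['X'], (1:Int)), (['Y'], 2), (['Z'], 3)]).getD (PySem.List.pyGetD (PySem.Chars.splitOn line [' ']) 1 []) 0 + 6
      else
        total + (PySem.Dict.ofList [(['X'], (1:Int)), (['Y'], 2), (['Z'], 3)]).getD (PySem.List.pyGetD (PySem.Chars.splitOn line [' ']) 1 []) 0) acc
    = acc + pvScoreA (lines.map (fun x => PySem.Chars.splitOn x [' '])) := by
  induction lines generalizing acc with
  | nil => simp [pvScoreA_nil]
  | cons line rest ih =>
    simp only [List.foldl_cons, List.map_cons]
    rw [ih, pvScoreA_cons, pvStep]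
    ring

-- ===== VERDICT (by name: the statement is the Claim_ definition above) =====
theorem part1_spec : Claim_equal_part1 := by
  intro data _ _
  unfold Spec_part1 part1 part1_alt
  dsimp only
  rw [pvFold]
  simp only [pvScoreA]
  ring
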